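-- pv_equiv track=rewrite | github.com/ouatu-ro/mtm | tools/generate_raw_tm_c.py | _packed_array
-- ===== SOURCE A (Python) =====
-- def _packed_array(name: str, next_values: list[int], write_values: list[int], move_codes: list[int]) -> list[str]:
--     lines = [f"static const uint64_t {name}[] = {{"]
--     row: list[str] = []
--     for next_state, write_symbol, move_code in zip(next_values, write_values, move_codes, strict=True):
--         if next_state < 0:
--             value = "0ULL"
--         else:
--             packed = (1 << 63) | (move_code << 48) | (write_symbol << 32) | next_state
--             value = f"{packed}ULL"
--         row.append(value)
--         if len(row) == 8:
--             lines.append("  " + ", ".join(row) + ",")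
--             row = []
--     if row:
--         lines.append("  " + ", ".join(row) + ",")
--     lines.append("};")
--     return lines
-- ===== SOURCE B (Python) =====
-- def _packed_array(name: str, next_values: list[int], write_values: list[int], move_codes: list[int]) -> list[str]:
--     values = [
--         "0ULL" if ns < 0 else f"{(1 << 63) | (mc << 48) | (ws << 32) | ns}ULL"
--         for ns, ws, mc in zip(next_values, write_values, move_codes, strict=True)
--     ]
--     lines = [f"static const uint64_t {name}[] = {{"]
--     i = 0
--     while i < len(values):
--         lines.append("  " + ", ".join(values[i:i + 8]) + ",")
--         i += 8
--     lines.append("};")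
--     return lines
-- ===== Notes on version B (the rewrite author's own statement) =====
-- stated objective: simpler
-- what changed: B first maps all triples to their value strings in one comprehension, then emits rows by slicing that list 8 at a time with an index loop, instead of A's running row buffer with an in-loop flush and a trailing remainder branch.
import Mathlib
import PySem

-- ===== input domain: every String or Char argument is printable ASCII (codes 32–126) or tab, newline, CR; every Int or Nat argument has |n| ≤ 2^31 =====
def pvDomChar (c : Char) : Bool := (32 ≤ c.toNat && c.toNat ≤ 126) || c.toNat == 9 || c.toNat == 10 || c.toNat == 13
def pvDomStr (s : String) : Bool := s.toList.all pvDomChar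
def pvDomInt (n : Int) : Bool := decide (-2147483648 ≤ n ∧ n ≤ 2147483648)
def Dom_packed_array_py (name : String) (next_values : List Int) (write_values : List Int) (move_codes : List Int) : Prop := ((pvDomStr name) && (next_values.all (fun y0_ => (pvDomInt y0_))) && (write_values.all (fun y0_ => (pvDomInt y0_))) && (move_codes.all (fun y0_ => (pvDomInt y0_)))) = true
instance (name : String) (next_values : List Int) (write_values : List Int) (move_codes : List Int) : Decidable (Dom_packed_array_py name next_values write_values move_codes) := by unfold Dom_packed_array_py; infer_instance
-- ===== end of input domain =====

-- B replaces A's running row buffer (with in-loop flush and trailing remainder branch)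
-- by one map over the zipped triples followed by slice-based chunking (objective: simpler).

-- ===== PORT A =====
-- A's loop: state is (lines, row); each triple appends a value to row, flushing row when it reaches 8.
def pvALoop : List (Int × Int × Int) → List String → List String → List String × List String
  | [], lines, row => (lines, row)
  | (next_state, write_symbol, move_code) :: rest, lines, row =>
      let value : String :=
        if next_state < 0 then "0ULL"
        else
          let packed := PySem.Int.bor (PySem.Int.bor (PySem.Int.bor ((1 : Int) <<< 63) (move_code <<< 48)) (write_symbol <<< 32)) next_state
          PySem.Int.toStr packed ++ "ULL"
      let row' := row ++ [value]
      if row'.length = 8 then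
        pvALoop rest (lines ++ ["  " ++ PySem.Str.join ", " row' ++ ","]) []
      else
        pvALoop rest lines row'

def packed_array_py (name : String) (next_values : List Int) (write_values : List Int) (move_codes : List Int) : List String :=
  let lines0 := ["static const uint64_t " ++ name ++ "[] = {"]
  let p := pvALoop (next_values.zip (write_values.zip move_codes)) lines0 []
  let lines1 := if p.2 ≠ [] then p.1 ++ ["  " ++ PySem.Str.join ", " p.2 ++ ","] else p.1
  lines1 ++ ["};"]

-- ===== PORT B =====
def pvBValue : Int × Int × Int → String
  | (ns, ws, mc) =>
      if ns < 0 then "0ULL"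
      else PySem.Int.toStr (PySem.Int.bor (PySem.Int.bor (PySem.Int.bor ((1 : Int) <<< 63) (mc <<< 48)) (ws <<< 32)) ns) ++ "ULL"

-- B's while loop: i steps by 8; each step emits one row from values[i:i+8].
def pvBLoop2 (values : List String) (lines : List String) (i : Int) : List String :=
  if i < (values.length : Int) then
    pvBLoop2 values
      (lines ++ ["  " ++ PySem.Str.join ", " (PySem.List.slice values (some i) (some (i + 8))) ++ ","])
      (i + 8)
  else lines
termination_by ((values.length : Int) - i).toNat
decreasing_by omega

def packed_array_py_alt (name : String) (next_values : List Int) (write_values : List Int) (move_codes : List Int) : List String :=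
  let values := (next_values.zip (write_values.zip move_codes)).map pvBValue
  let lines := ["static const uint64_t " ++ name ++ "[] = {"]
  pvBLoop2 values lines 0 ++ ["};"]

-- ===== PRECONDITION & SPEC =====
-- zip(..., strict=True) raises ValueError on unequal-length lists; Pre_ excludes exactly those.
def Pre_packed_array_py (name : String) (next_values : List Int) (write_values : List Int) (move_codes : List Int) : Prop :=
  next_values.length = write_values.length ∧ write_values.length = move_codes.length
instance (name : String) (next_values : List Int) (write_values : List Int) (move_codes : List Int) : Decidable (Pre_packed_array_py name next_values write_values move_codes) := by unfold Pre_packed_array_py; infer_instance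

def pvWitness_packed_array_py : String × List Int × List Int × List Int := ("tm", [3, -1], [1, 0], [2, 0])

def Spec_packed_array_py (name : String) (next_values : List Int) (write_values : List Int) (move_codes : List Int) (out : List String) : Prop := out = packed_array_py_alt name next_values write_values move_codes
instance (name : String) (next_values : List Int) (write_values : List Int) (move_codes : List Int) (out : List String) : Decidable (Spec_packed_array_py name next_values write_values move_codes out) := by unfold Spec_packed_array_py; infer_instance

-- ===== CLAIM (what is proved, stated in full; the proofs are below) =====
def Claim_equal_packed_array_py : Prop := ∀ (name : String) (next_values : List Int) (write_values : List Int) (move_codes : List Int), Dom_packed_array_py name next_values write_values move_codes → Pre_packed_array_py name next_values write_values move_codes → Spec_packed_array_py name next_values write_values move_codes (packed_array_py name next_values write_values move_codes)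

-- ===== LEMMAS AND PROOFS =====

-- Proof helper: chunk-at-a-time recursion both loops are compared against.
def pvBLoop (lines : List String) (values : List String) : List String :=
  match values with
  | [] => lines
  | v :: vs =>
      pvBLoop (lines ++ ["  " ++ PySem.Str.join ", " (PySem.List.slice (v :: vs) none (some 8)) ++ ","])
              (PySem.List.slice (v :: vs) (some 8) none)
termination_by values.length
decreasing_by rw [PySem.List.slice_from _ (by norm_num)]; simp

-- A's loop with values precomputed (bridged to pvALoop below).
def pvALoopV : List String → List String → List String → List String × List String
  | [], lines, row => (lines, row)
  | v :: rest, lines, row =>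
      let row' := row ++ [v]
      if row'.length = 8 then
        pvALoopV rest (lines ++ ["  " ++ PySem.Str.join ", " row' ++ ","]) []
      else
        pvALoopV rest lines row'

theorem pvALoop_eq_V (ts : List (Int × Int × Int)) (lines row : List String) :
    pvALoop ts lines row = pvALoopV (ts.map pvBValue) lines row := by
  induction ts generalizing lines row with
  | nil => rfl
  | cons t rest ih =>
      obtain ⟨ns, ws, mc⟩ := t
      simp only [pvALoop, pvALoopV, List.map, pvBValue]
      split_ifs <;> apply ih

theorem pvBLoop_nil (lines : List String) : pvBLoop lines [] = lines := by
  unfold pvBLoop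
  rfl

theorem pvBLoop_cons (v : String) (vs lines : List String) :
    pvBLoop lines (v :: vs) =
      pvBLoop (lines ++ ["  " ++ PySem.Str.join ", " ((v :: vs).take 8) ++ ","]) ((v :: vs).drop 8) := by
  conv_lhs => unfold pvBLoop
  rw [PySem.List.slice_to _ (by norm_num : (0:Int) ≤ (8:Int)), PySem.List.slice_from _ (by norm_num : (0:Int) ≤ (8:Int))]
  simp

theorem pvBLoop2_eq (values lines : List String) (i : Int) (h0 : 0 ≤ i) :
    pvBLoop2 values lines i = pvBLoop lines (values.drop i.toNat) := by
  by_cases h : i < (values.length : Int)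
  · conv_lhs => rw [pvBLoop2]
    rw [if_pos h]
    rw [pvBLoop2_eq values _ (i + 8) (by omega)]
    have hsl : PySem.List.slice values (some i) (some (i + 8)) = (values.drop i.toNat).take 8 := by
      rw [PySem.List.slice_toNat _ h0 (by omega)]
      congr 1
      omega
    have hdr : values.drop (i + 8).toNat = (values.drop i.toNat).drop 8 := by
      rw [List.drop_drop]
      congr 1
      omega
    cases hd : values.drop i.toNat with
    | nil =>
        have : values.length - i.toNat = 0 := by simpa using congrArg List.length hd
        omega
    | cons v vs =>
        rw [pvBLoop_cons, hsl, hdr, hd]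
  · conv_lhs => rw [pvBLoop2]
    rw [if_neg h]
    have : values.drop i.toNat = [] := List.drop_eq_nil_of_le (by omega)
    rw [this, pvBLoop_nil]
termination_by ((values.length : Int) - i).toNat
decreasing_by omega

-- Main invariant: flushing A's pending row then finishing equals B chunking row ++ vs.
theorem pvMain (vs : List String) (lines row : List String) (h : row.length < 8) :
    (let p := pvALoopV vs lines row
     if p.2 ≠ [] then p.1 ++ ["  " ++ PySem.Str.join ", " p.2 ++ ","] else p.1)
    = pvBLoop lines (row ++ vs) := by
  induction vs generalizing lines row with
  | nil =>
      simp only [pvALoopV, List.append_nil]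
      cases row with
      | nil => simp [pvBLoop_nil]
      | cons r rs =>
          rw [pvBLoop_cons]
          have ht : (r :: rs).take 8 = r :: rs := List.take_of_length_le (by omega)
          have hd : (r :: rs).drop 8 = [] := List.drop_eq_nil_of_le (by simpa using Nat.le_of_lt h)
          simp [ht, hd, pvBLoop_nil]
  | cons v rest ih =>
      simp only [pvALoopV]
      by_cases hfull : (row ++ [v]).length = 8
      · rw [if_pos hfull]
        rw [ih _ [] (by norm_num), List.nil_append]
        have hsplit : row ++ v :: rest = (row ++ [v]) ++ rest := by simp
        rw [hsplit]
        cases hrv : row ++ [v] with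
        | nil => simp at hrv
        | cons x xs =>
            have hlen : (x :: xs).length = 8 := by rw [← hrv]; exact hfull
            rw [show (x :: xs) ++ rest = x :: (xs ++ rest) from rfl, pvBLoop_cons]
            have ht : (x :: (xs ++ rest)).take 8 = x :: xs := by
              rw [show x :: (xs ++ rest) = (x :: xs) ++ rest from rfl,
                  List.take_append_of_le_length (by omega), List.take_of_length_le (by omega)]
            have hd : (x :: (xs ++ rest)).drop 8 = rest := by
              rw [show x :: (xs ++ rest) = (x :: xs) ++ rest from rfl,
                  List.drop_append_of_le_length (by omega), List.drop_eq_nil_of_le (by omega)]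
              simp
            rw [ht, hd]
      · rw [if_neg hfull]
        rw [ih _ (row ++ [v]) (by simp at hfull ⊢; omega)]
        simp

-- ===== VERDICT (by name: the statement is the Claim_ definition above) =====
theorem packed_array_py_spec : Claim_equal_packed_array_py := by
  intro name nv wv mc _ _
  unfold Spec_packed_array_py packed_array_py packed_array_py_alt
  dsimp only
  rw [pvALoop_eq_V]
  have := pvMain ((nv.zip (wv.zip mc)).map pvBValue)
      ["static const uint64_t " ++ name ++ "[] = {"] [] (by norm_num)
  simp only [List.nil_append] at this
  rw [this, pvBLoop2_eq _ _ 0 (by norm_num)]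
  simp
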